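-- pv_equiv track=rewrite | github.com/rachelwhy/Respond-in-90-seconds | src/core/extractor.py | _find_missing_fields
-- ===== SOURCE A (Python) =====
-- from typing import Dict, List, Any, Optional
--
-- def _find_missing_fields(records: List[Dict], field_names: List[str]) -> List[str]:
--     if not records or not field_names:
--         return field_names if not records else []
--     covered = set()
--     for rec in records:
--         for f, v in rec.items():
--             if v:
--                 covered.add(f)
--     return [f for f in field_names if f not in covered]
-- ===== SOURCE B (Python) =====
-- def _find_missing_fields(records, field_names):
--     # Inverted traversal: for each field, scan records for any truthy value;
--     # no covered-index is built.  Absent key -> rec.get(f) is None -> falsy.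
--     return [f for f in field_names if not any(rec.get(f) for rec in records)]
-- ===== Notes on version B (the rewrite author's own statement) =====
-- stated objective: alternative
-- what changed: A builds a 'covered' set by scanning every key/value pair of every record and then filters field_names against it; B keeps no index and instead, per field name, asks whether any record has a truthy value for that field via rec.get, also removing A's special-case guards.
import Mathlib
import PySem

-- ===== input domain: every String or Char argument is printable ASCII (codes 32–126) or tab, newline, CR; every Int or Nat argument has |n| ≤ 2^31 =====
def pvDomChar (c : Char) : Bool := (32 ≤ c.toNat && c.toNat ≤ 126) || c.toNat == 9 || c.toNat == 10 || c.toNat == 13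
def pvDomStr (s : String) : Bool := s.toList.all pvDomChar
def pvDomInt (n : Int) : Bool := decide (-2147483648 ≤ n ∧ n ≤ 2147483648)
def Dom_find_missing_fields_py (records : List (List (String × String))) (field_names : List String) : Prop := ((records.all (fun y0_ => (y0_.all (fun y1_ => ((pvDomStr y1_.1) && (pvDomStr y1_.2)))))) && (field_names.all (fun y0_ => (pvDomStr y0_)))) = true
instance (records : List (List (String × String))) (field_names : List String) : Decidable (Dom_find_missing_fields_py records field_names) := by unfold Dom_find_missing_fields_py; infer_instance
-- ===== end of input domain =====

-- ===== PORT A =====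
-- B re-scans records per field via first-match lookup instead of building A's covered set (alternative decomposition, not claimed faster).
def find_missing_fields_py (records : List (List (String × String))) (field_names : List String) : List String :=
  if records.isEmpty || field_names.isEmpty then
    (if records.isEmpty then field_names else [])
  else
    let covered : PySem.Set String :=
      records.foldl
        (fun s rec => rec.foldl (fun s p => if p.2 != "" then PySem.Set.add s p.1 else s) s)
        PySem.Set.empty
    field_names.filter (fun f => ! PySem.Set.contains covered f)

-- ===== PORT B =====
-- rec.get(f) truthiness: first matching pair's value must be nonempty; absent key is falsy.
def pyGetTruthy (rec : List (String × String)) (f : String) : Bool :=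
  match rec.find? (fun p => p.1 == f) with
  | some p => p.2 != ""
  | none => false

def find_missing_fields_py_alt (records : List (List (String × String))) (field_names : List String) : List String :=
  field_names.filter (fun f => ! records.any (fun rec => pyGetTruthy rec f))

-- ===== PRECONDITION & SPEC =====
-- Pre_ excludes association lists with duplicate keys inside a record: such lists do not
-- represent any Python dict (Python A never receives them), and there the first-match
-- lookup convention and A's full-scan of items would disagree.
def Pre_find_missing_fields_py (records : List (List (String × String))) (field_names : List String) : Prop :=
  ∀ rec ∈ records, (rec.map Prod.fst).Nodup
instance (records : List (List (String × String))) (field_names : List String) : Decidable (Pre_find_missing_fields_py records field_names) := by unfold Pre_find_missing_fields_py; infer_instance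
def pvWitness_find_missing_fields_py : (List (List (String × String))) × List String :=
  ([[("a", "x"), ("b", "")]], ["a", "b", "c"])
def Spec_find_missing_fields_py (records : List (List (String × String))) (field_names : List String) (out : List String) : Prop := out = find_missing_fields_py_alt records field_names
instance (records : List (List (String × String))) (field_names : List String) (out : List String) : Decidable (Spec_find_missing_fields_py records field_names out) := by unfold Spec_find_missing_fields_py; infer_instance

-- ===== CLAIM (what is proved, stated in full; the proofs are below) =====
def Claim_equal_find_missing_fields_py : Prop := ∀ (records : List (List (String × String))) (field_names : List String), Dom_find_missing_fields_py records field_names → Pre_find_missing_fields_py records field_names → Spec_find_missing_fields_py records field_names (find_missing_fields_py records field_names)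

-- ===== LEMMAS AND PROOFS =====

theorem mem_inner_foldl (rec : List (String × String)) (s : PySem.Set String) (f : String) :
    f ∈ rec.foldl (fun s p => if p.2 != "" then PySem.Set.add s p.1 else s) s ↔
      f ∈ s ∨ ∃ p ∈ rec, p.1 = f ∧ p.2 ≠ "" := by
  induction rec generalizing s with
  | nil => simp
  | cons p rest ih =>
    simp only [List.foldl_cons, ih, List.mem_cons]
    split
    · next h =>
      simp only [PySem.Set.mem_add]
      constructor
      · rintro (⟨hs | hf⟩ | ⟨q, hq, h1, h2⟩)
        · exact Or.inl hs
        · exact Or.inr ⟨p, Or.inl rfl, hf.symm, by simpa using h⟩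
        · exact Or.inr ⟨q, Or.inr hq, h1, h2⟩
      · rintro (hs | ⟨q, (rfl | hq), h1, h2⟩)
        · exact Or.inl (Or.inl hs)
        · exact Or.inl (Or.inr h1.symm)
        · exact Or.inr ⟨q, hq, h1, h2⟩
    · next h =>
      constructor
      · rintro (hs | ⟨q, hq, h1, h2⟩)
        · exact Or.inl hs
        · exact Or.inr ⟨q, Or.inr hq, h1, h2⟩
      · rintro (hs | ⟨q, (rfl | hq), h1, h2⟩)
        · exact Or.inl hs
        · exact absurd h2 (by simpa using h)
        · exact Or.inr ⟨q, hq, h1, h2⟩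

theorem mem_outer_foldl (records : List (List (String × String))) (s : PySem.Set String) (f : String) :
    f ∈ records.foldl
        (fun s rec => rec.foldl (fun s p => if p.2 != "" then PySem.Set.add s p.1 else s) s) s ↔
      f ∈ s ∨ ∃ rec ∈ records, ∃ p ∈ rec, p.1 = f ∧ p.2 ≠ "" := by
  induction records generalizing s with
  | nil => simp
  | cons rec rest ih =>
    simp only [List.foldl_cons, ih, mem_inner_foldl, List.mem_cons]
    constructor
    · rintro (⟨hs | hp⟩ | ⟨r, hr, hp⟩)
      · exact Or.inl hs
      · exact Or.inr ⟨rec, Or.inl rfl, hp⟩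
      · exact Or.inr ⟨r, Or.inr hr, hp⟩
    · rintro (hs | ⟨r, (rfl | hr), hp⟩)
      · exact Or.inl (Or.inl hs)
      · exact Or.inl (Or.inr hp)
      · exact Or.inr ⟨r, hr, hp⟩

theorem pyGetTruthy_iff (rec : List (String × String)) (f : String)
    (h : (rec.map Prod.fst).Nodup) :
    pyGetTruthy rec f = true ↔ ∃ p ∈ rec, p.1 = f ∧ p.2 ≠ "" := by
  induction rec with
  | nil => simp [pyGetTruthy]
  | cons p rest ih =>
    simp only [List.map_cons, List.nodup_cons, List.mem_map] at h
    obtain ⟨hnot, hrest⟩ := h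
    simp only [pyGetTruthy, List.find?_cons]
    by_cases hpf : p.1 = f
    · simp only [hpf, beq_self_eq_true, List.mem_cons]
      constructor
      · intro hv
        exact ⟨p, Or.inl rfl, hpf, by simpa using hv⟩
      · rintro ⟨q, (rfl | hq), h1, h2⟩
        · simpa using h2
        · exact absurd ⟨q, hq, by rw [h1, hpf]⟩ hnot
    · have : (p.1 == f) = false := by simpa using hpf
      simp only [this, List.mem_cons]
      rw [show (match rest.find? (fun q => q.1 == f) with
            | some q => q.2 != ""
            | none => false) = pyGetTruthy rest f from rfl, ih hrest]
      constructor
      · rintro ⟨q, hq, h1, h2⟩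
        exact ⟨q, Or.inr hq, h1, h2⟩
      · rintro ⟨q, (rfl | hq), h1, h2⟩
        · exact absurd h1 hpf
        · exact ⟨q, hq, h1, h2⟩

-- ===== VERDICT (by name: the statement is the Claim_ definition above) =====
theorem find_missing_fields_py_spec : Claim_equal_find_missing_fields_py := by
  intro records field_names _ hpre
  unfold Spec_find_missing_fields_py find_missing_fields_py find_missing_fields_py_alt
  by_cases hr : records = []
  · subst hr
    simp
  · by_cases hf : field_names = []
    · subst hf; simp
    · simp only [List.isEmpty_iff, hr, hf, if_false, Bool.or_eq_true, or_self]
      apply List.filter_congr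
      intro f _
      congr 1
      rw [Bool.eq_iff_iff, PySem.Set.contains_iff, mem_outer_foldl, List.any_eq_true]
      simp only [PySem.Set.empty, List.not_mem_nil, false_or]
      constructor
      · rintro ⟨rec, hrec, hp⟩
        exact ⟨rec, hrec, (pyGetTruthy_iff rec f (hpre rec hrec)).mpr hp⟩
      · rintro ⟨rec, hrec, hp⟩
        exact ⟨rec, hrec, (pyGetTruthy_iff rec f (hpre rec hrec)).mp hp⟩
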